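-- pv_equiv track=rewrite | github.com/Aren-Garro/Flowcharts | src/importers/workflow_detector.py | _count_transition_indicators
-- ===== SOURCE A (Python) =====
-- def _count_transition_indicators(text: str) -> int:
--     lowered = text.lower()
--     indicators = [
--         "move the ticket to",
--         "move the deal to",
--         "move the item to",
--         "move to '",
--         'move to "',
--         "change status to",
--         "update ticket to",
--         "proceed to section",
--         "next step:",
--     ]
--     return sum(lowered.count(phrase) for phrase in indicators)
-- ===== SOURCE B (Python) =====
-- PHRASES = (
--     "move the ticket to",
--     "move the deal to",
--     "move the item to",
--     "move to '",
--     'move to "',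
--     "change status to",
--     "update ticket to",
--     "proceed to section",
--     "next step:",
-- )
--
--
-- def _count_transition_indicators(text: str) -> int:
--     # One left-to-right scan: at each position count the phrases starting there,
--     # instead of nine independent str.count passes over the text.
--     lowered = text.lower()
--     total = 0
--     for i in range(len(lowered)):
--         total += sum(1 for p in PHRASES if lowered.startswith(p, i))
--     return total
-- ===== Notes on version B (the rewrite author's own statement) =====
-- stated objective: alternative
-- what changed: Replaced nine independent str.count passes with a single left-to-right scan that at each position counts which phrases start there (correct because no phrase has a nonempty border, so per-phrase non-overlapping counts equal match-position counts).
import Mathlib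
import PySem

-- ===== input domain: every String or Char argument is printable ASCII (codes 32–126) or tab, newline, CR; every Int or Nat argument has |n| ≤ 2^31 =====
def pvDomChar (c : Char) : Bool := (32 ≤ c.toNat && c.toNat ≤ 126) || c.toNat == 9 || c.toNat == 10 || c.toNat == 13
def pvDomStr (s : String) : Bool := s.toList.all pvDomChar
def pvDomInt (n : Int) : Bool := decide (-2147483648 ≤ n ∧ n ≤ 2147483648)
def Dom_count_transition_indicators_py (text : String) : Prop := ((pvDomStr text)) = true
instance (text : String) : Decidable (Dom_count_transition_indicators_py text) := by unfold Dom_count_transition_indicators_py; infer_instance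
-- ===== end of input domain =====

-- B replaces nine independent `str.count` passes with one left-to-right scan that counts,
-- at each position, which phrases start there (objective: alternative, same cost).

-- ===== PORT A =====
def pvIndicators : List String :=
  ["move the ticket to",
   "move the deal to",
   "move the item to",
   "move to '",
   "move to \"",
   "change status to",
   "update ticket to",
   "proceed to section",
   "next step:"]

def count_transition_indicators_py (text : String) : Int :=
  let lowered := PySem.Str.lower text
  (pvIndicators.map (fun phrase => (PySem.Str.count lowered phrase : Int))).sum

-- ===== PORT B =====
def pvAltPhrases : List (List Char) :=
  ["move the ticket to".toList,
   "move the deal to".toList,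
   "move the item to".toList,
   "move to '".toList,
   "move to \"".toList,
   "change status to".toList,
   "update ticket to".toList,
   "proceed to section".toList,
   "next step:".toList]

-- B's loop `for i in range(len(lowered))` over start positions = recursion over the suffixes;
-- `lowered.startswith(p, i)` = `p.isPrefixOf` on the suffix.
def pvAltGo : List Char → Int
  | [] => 0
  | l@(_ :: t) => (pvAltPhrases.countP (fun p => p.isPrefixOf l) : Int) + pvAltGo t

def count_transition_indicators_py_alt (text : String) : Int :=
  pvAltGo (PySem.Str.lower text).toList

-- ===== PRECONDITION & SPEC =====
def Spec_count_transition_indicators_py (text : String) (out : Int) : Prop := out = count_transition_indicators_py_alt text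
instance (text : String) (out : Int) : Decidable (Spec_count_transition_indicators_py text out) := by unfold Spec_count_transition_indicators_py; infer_instance

-- ===== CLAIM (what is proved, stated in full; the proofs are below) =====
def Claim_equal_count_transition_indicators_py : Prop := ∀ (text : String), Dom_count_transition_indicators_py text → Spec_count_transition_indicators_py text (count_transition_indicators_py text)

-- ===== LEMMAS AND PROOFS =====

/-- Number of positions of `l` at which `p` starts. -/
def pvCpos (p : List Char) : List Char → Nat
  | [] => 0
  | l@(_ :: t) => (if p.isPrefixOf l then 1 else 0) + pvCpos p t

/-- `p` has no nonempty proper border (proper prefix that is also a suffix). -/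
def pvNoBorder (p : List Char) : Prop :=
  ∀ j < p.length, 0 < j → p.drop j ≠ p.take (p.length - j)

/-- Two overlapping occurrences of a border-free `p` are impossible. -/
lemma pvNoOverlap {p l : List Char} (hb : pvNoBorder p) {j : Nat}
    (hj0 : 0 < j) (hjp : j < p.length)
    (h1 : p.isPrefixOf l = true) (h2 : p.isPrefixOf (l.drop j) = true) : False := by
  rw [List.isPrefixOf_iff_prefix] at h1 h2
  have hd : p.drop j <+: l.drop j := h1.drop j
  have hpre : p.drop j <+: p := by
    exact List.prefix_of_prefix_length_le hd h2 (by simp)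
  have : p.drop j = p.take (p.drop j).length := List.prefix_iff_eq_take.mp hpre
  exact hb j hjp hj0 (by simpa using this)

/-- Skipping match-free positions does not change the position count. -/
lemma pvCpos_drop (p : List Char) : ∀ (k : Nat) (l : List Char),
    (∀ j < k, ¬ p.isPrefixOf (l.drop j) = true) → k ≤ l.length →
    pvCpos p l = pvCpos p (l.drop k) := by
  intro k
  induction k with
  | zero => intro l _ _; simp
  | succ n ih =>
    intro l h hk
    cases l with
    | nil => simp at hk
    | cons a t =>
      have h0 : ¬ p.isPrefixOf (a :: t) = true := by simpa using h 0 (Nat.succ_pos n)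
      have := ih t (fun j hj => by simpa using h (j + 1) (by omega)) (by simpa using Nat.le_of_succ_le_succ hk)
      simp [pvCpos, h0, this]

/-- At a match of a border-free nonempty `p`, the position count steps by one full `p.length`. -/
lemma pvCpos_match {p l : List Char} (hp : p ≠ []) (hb : pvNoBorder p)
    (hm : p.isPrefixOf l = true) :
    pvCpos p l = 1 + pvCpos p (l.drop p.length) := by
  have hlen : p.length ≤ l.length := (List.isPrefixOf_iff_prefix.mp hm).length_le
  cases l with
  | nil => cases hp (List.eq_nil_of_length_eq_zero (Nat.le_zero.mp hlen))
  | cons a t =>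
    have hplen : 0 < p.length := List.length_pos_iff.mpr hp
    have hdrop : (a :: t).drop p.length = t.drop (p.length - 1) := by
      cases hh : p.length with
      | zero => omega
      | succ n => simp
    have ht : pvCpos p t = pvCpos p (t.drop (p.length - 1)) := by
      apply pvCpos_drop
      · intro j hj hmatch
        have : t.drop j = (a :: t).drop (j + 1) := by simp
        exact pvNoOverlap hb (Nat.succ_pos j) (by omega) hm (by rw [← this]; exact hmatch)
      · have hlen' : p.length ≤ t.length + 1 := by simpa using hlen
        simpa using by omega
    simp [pvCpos, hm, hdrop, ht]

/-- The non-overlapping scanner of `PySem.Chars.count` agrees with the position count. -/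
lemma pvGo_eq {p : List Char} (hp : p ≠ []) (hb : pvNoBorder p) :
    ∀ (fuel : Nat) (l : List Char) (acc : Nat), l.length ≤ fuel →
    PySem.Chars.count.go p fuel l acc = acc + pvCpos p l := by
  intro fuel
  induction fuel with
  | zero =>
    intro l acc hl
    have : l = [] := List.eq_nil_of_length_eq_zero (Nat.le_zero.mp hl)
    subst this
    simp [PySem.Chars.count.go, pvCpos]
  | succ n ih =>
    intro l acc hl
    cases l with
    | nil => simp [PySem.Chars.count.go, pvCpos]
    | cons a t =>
      rw [PySem.Chars.count.go]
      by_cases hm : p.isPrefixOf (a :: t) = true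
      · have hplen : 0 < p.length := List.length_pos_iff.mpr hp
        have hrec := ih ((a :: t).drop p.length) (acc + 1) (by simp at hl ⊢; omega)
        simp only [hm, if_true, hrec, pvCpos_match hp hb hm]
        omega
      · have hrec := ih t acc (by simp at hl ⊢; omega)
        simp only [hm, if_false, Bool.false_eq_true, hrec]
        simp [pvCpos, hm]

lemma pvCount_eq_cpos (p : List Char) (hp : p ≠ []) (hb : pvNoBorder p) (l : List Char) :
    PySem.Chars.count l p = pvCpos p l := by
  have : p.isEmpty = false := by simpa [List.isEmpty_iff]
  simp [PySem.Chars.count, this, pvGo_eq hp hb l.length l 0 (le_refl _)]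

lemma pvMap_count_eq (l : List Char) :
    pvIndicators.map (fun s => (PySem.Chars.count l s.toList : Int)) =
    pvAltPhrases.map (fun p => ((pvCpos p l : Nat) : Int)) := by
  simp only [pvIndicators, pvAltPhrases, List.map_cons, List.map_nil]
  rw [pvCount_eq_cpos "move the ticket to".toList (by decide) (by unfold pvNoBorder; decide) l,
      pvCount_eq_cpos "move the deal to".toList (by decide) (by unfold pvNoBorder; decide) l,
      pvCount_eq_cpos "move the item to".toList (by decide) (by unfold pvNoBorder; decide) l,
      pvCount_eq_cpos "move to '".toList (by decide) (by unfold pvNoBorder; decide) l,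
      pvCount_eq_cpos "move to \"".toList (by decide) (by unfold pvNoBorder; decide) l,
      pvCount_eq_cpos "change status to".toList (by decide) (by unfold pvNoBorder; decide) l,
      pvCount_eq_cpos "update ticket to".toList (by decide) (by unfold pvNoBorder; decide) l,
      pvCount_eq_cpos "proceed to section".toList (by decide) (by unfold pvNoBorder; decide) l,
      pvCount_eq_cpos "next step:".toList (by decide) (by unfold pvNoBorder; decide) l]

/-- Exchanging the two summations: per-position totals equal per-phrase totals. -/
lemma pvAltGo_eq_sum (l : List Char) :
    pvAltGo l = (pvAltPhrases.map (fun p => ((pvCpos p l : Nat) : Int))).sum := by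
  induction l with
  | nil => simp [pvAltGo, pvCpos, pvAltPhrases]
  | cons a t ih =>
    have hsplit :
        (pvAltPhrases.map (fun p => ((pvCpos p (a :: t) : Nat) : Int))).sum =
        (pvAltPhrases.map (fun p => (if p.isPrefixOf (a :: t) then (1 : Int) else 0))).sum +
        (pvAltPhrases.map (fun p => ((pvCpos p t : Nat) : Int))).sum := by
      simp only [pvCpos]
      rw [← List.sum_map_add]
      apply congrArg
      apply List.map_congr_left
      intro p _
      split_ifs <;> push_cast <;> ring
    have hcnt :
        (pvAltPhrases.map (fun p => (if p.isPrefixOf (a :: t) then (1 : Int) else 0))).sum =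
        (pvAltPhrases.countP (fun p => p.isPrefixOf (a :: t)) : Int) :=
      PySem.List.sum_map_ite_one_zero _ _
    show (pvAltPhrases.countP (fun p => p.isPrefixOf (a :: t)) : Int) + pvAltGo t =
      (pvAltPhrases.map (fun p => ((pvCpos p (a :: t) : Nat) : Int))).sum
    rw [hsplit, hcnt, ih]

-- ===== VERDICT (by name: the statement is the Claim_ definition above) =====
theorem count_transition_indicators_py_spec : Claim_equal_count_transition_indicators_py := by
  intro text _
  unfold Spec_count_transition_indicators_py count_transition_indicators_py count_transition_indicators_py_alt
  simp only [PySem.Str.count]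
  rw [pvMap_count_eq, ← pvAltGo_eq_sum]
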